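-- pv_equiv track=rewrite | github.com/tijko/CodeSignal | Edge-of-the-Ocean/matrixElementSum.py | solution
-- ===== SOURCE A (Python) =====
-- def solution(matrix: [[int]]) -> int:
--     # number of floors
--     length = len(matrix)
--     total = 0
--     matching = list(range(len(matrix[0])))
--     ghosts = list()
--     for i in range(length):
--         for j in matching:
--             if j in ghosts: continue
--             if matrix[i][j] == 0:
--                 ghosts.append(j)
--             else:
--                 total += matrix[i][j]
--     return total
-- ===== SOURCE B (Python) =====
-- def solution(matrix: [[int]]) -> int:
--     total = 0
--     for j in range(len(matrix[0])):
--         for row in matrix: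
--             if row[j] == 0:
--                 break
--             total += row[j]
--     return total
-- ===== Notes on version B (the rewrite author's own statement) =====
-- stated objective: simpler
-- what changed: Column-major traversal with an early break per column replaces the row-major loop that maintains a 'ghosts' list of blocked columns and a membership test on every cell.
import Mathlib
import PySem

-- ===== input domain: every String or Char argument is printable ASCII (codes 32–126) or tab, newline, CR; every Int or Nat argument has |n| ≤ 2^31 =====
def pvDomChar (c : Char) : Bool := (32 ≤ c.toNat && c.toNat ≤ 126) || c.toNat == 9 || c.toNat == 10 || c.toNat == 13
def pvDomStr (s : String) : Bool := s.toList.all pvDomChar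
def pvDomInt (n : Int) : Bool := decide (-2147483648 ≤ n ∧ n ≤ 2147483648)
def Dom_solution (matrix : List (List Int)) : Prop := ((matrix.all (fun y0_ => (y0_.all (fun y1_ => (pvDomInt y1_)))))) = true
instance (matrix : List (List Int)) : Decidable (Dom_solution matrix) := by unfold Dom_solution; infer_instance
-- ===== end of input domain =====

-- B replaces A's row-major loop with its 'ghosts' blocked-column list by a
-- column-major loop that simply breaks at the first zero in each column (simpler).

-- row[j]: Python raises IndexError out of range; Pre_solution keeps every access in
-- range, where getD is exact.
def pyCell (r : List Int) (j : Nat) : Int := r.getD j 0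

-- ===== PORT A =====
-- one step of A's inner 'for j in matching' body, state = (total, ghosts)
def rowStepA (r : List Int) (st : Int × List Nat) (j : Nat) : Int × List Nat :=
  if j ∈ st.2 then st
  else if pyCell r j = 0 then (st.1, st.2 ++ [j])
  else (st.1 + pyCell r j, st.2)

-- matrix[0] raises IndexError on []: excluded by Pre_solution, so headD is exact there
def solution (matrix : List (List Int)) : Int :=
  (((List.range matrix.length).foldl
      (fun st i => (List.range (matrix.headD []).length).foldl
        (rowStepA (matrix.getD i [])) st)
      ((0 : Int), ([] : List Nat)))).1

-- ===== PORT B =====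
-- B's inner 'for row in matrix: … break' loop, for a fixed column j
def colSumB (rows : List (List Int)) (j : Nat) : Int :=
  match rows with
  | [] => 0
  | r :: rest => if pyCell r j = 0 then 0 else pyCell r j + colSumB rest j

def solution_alt (matrix : List (List Int)) : Int :=
  (List.range (matrix.headD []).length).foldl
    (fun total j => total + colSumB matrix j) 0

-- ===== PRECONDITION & SPEC =====
-- Pre_ excludes exactly the inputs where the Python A raises IndexError: the empty
-- matrix (matrix[0]), and matrices where some column j < len(matrix[0]) hits a row
-- shorter than j+1 before any zero blocked that column (matrix[i][j]); a short row
-- in an already-blocked column is skipped by both programs and raises nothing.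
def Pre_solution (matrix : List (List Int)) : Prop :=
  matrix ≠ [] ∧
  ∀ j ∈ List.range (matrix.headD []).length,
    (∀ r ∈ matrix, j < r.length) ∨
    ∃ i ∈ List.range matrix.length,
      (matrix.getD i []).getD j 0 = 0 ∧
      ∀ k ∈ List.range (i + 1), j < (matrix.getD k []).length
instance (matrix : List (List Int)) : Decidable (Pre_solution matrix) := by
  unfold Pre_solution; infer_instance

def pvWitness_solution : List (List Int) := [[1, 0, 3], [2, 5, 0], [4, 6, 7]]

def Spec_solution (matrix : List (List Int)) (out : Int) : Prop := out = solution_alt matrix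
instance (matrix : List (List Int)) (out : Int) : Decidable (Spec_solution matrix out) := by
  unfold Spec_solution; infer_instance

-- ===== CLAIM (what is proved, stated in full; the proofs are below) =====
def Claim_equal_solution : Prop :=
  ∀ (matrix : List (List Int)), Dom_solution matrix → Pre_solution matrix →
    Spec_solution matrix (solution matrix)

-- ===== LEMMAS AND PROOFS =====

-- sum of two maps combines pointwise
theorem sum_map_add_int {α : Type} (l : List α) (f g : α → Int) :
    (l.map fun x => f x + g x).sum = (l.map f).sum + (l.map g).sum := by
  induction l with
  | nil => simp
  | cons a l ih => simp [ih]; ring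

-- mapping getD over the index range reproduces the list
theorem map_getD_range {α : Type} (xs : List α) (d : α) :
    (List.range xs.length).map (fun i => xs.getD i d) = xs := by
  apply List.ext_getElem
  · simp
  · intro i h1 h2
    simp [List.getD_eq_getElem?_getD, List.getElem?_eq_getElem h2]

-- folding over the index range of getD equals folding over the list itself
theorem foldl_range_getD {α β : Type} (xs : List α) (d : α) (G : β → α → β) (init : β) :
    (List.range xs.length).foldl (fun st i => G st (xs.getD i d)) init
      = xs.foldl G init := by
  conv_rhs => rw [← map_getD_range xs d]
  rw [List.foldl_map]

-- characterisation of A's inner fold over one row, for a duplicate-free column list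
theorem rowFoldA_spec (r : List Int) (L : List Nat) (hL : L.Nodup) :
    ∀ (t : Int) (g : List Nat),
      (L.foldl (rowStepA r) (t, g)).1
        = t + (L.map (fun j => if j ∈ g then 0
                               else if pyCell r j = 0 then 0 else pyCell r j)).sum
      ∧ ∀ x, x ∈ (L.foldl (rowStepA r) (t, g)).2
          ↔ x ∈ g ∨ (x ∈ L ∧ x ∉ g ∧ pyCell r x = 0) := by
  induction L with
  | nil => intro t g; simp
  | cons j L ih =>
    intro t g
    have hjL : j ∉ L := (List.nodup_cons.mp hL).1
    have hLnd : L.Nodup := (List.nodup_cons.mp hL).2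
    have ih' := ih hLnd
    by_cases hg : j ∈ g
    · rw [List.foldl_cons, show rowStepA r (t, g) j = (t, g) from by simp [rowStepA, hg]]
      obtain ⟨h1, h2⟩ := ih' t g
      refine ⟨by simp [h1, hg], fun x => ?_⟩
      rw [h2]
      by_cases hxj : x = j
      · subst hxj; simp [hg, hjL]
      · simp [hxj]
    · by_cases hz : pyCell r j = 0
      · rw [List.foldl_cons,
          show rowStepA r (t, g) j = (t, g ++ [j]) from by simp [rowStepA, hg, hz]]
        obtain ⟨h1, h2⟩ := ih' t (g ++ [j])
        have hmap : (L.map (fun x => if x ∈ g ++ [j] then 0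
                             else if pyCell r x = 0 then 0 else pyCell r x)).sum
            = (L.map (fun x => if x ∈ g then 0
                             else if pyCell r x = 0 then 0 else pyCell r x)).sum := by
          congr 1
          apply List.map_congr_left
          intro x hx
          have hxj : x ≠ j := fun h => hjL (h ▸ hx)
          simp [List.mem_append, hxj]
        constructor
        · rw [h1, hmap, List.map_cons, List.sum_cons]
          rw [if_neg hg, if_pos hz]
          ring
        · intro x
          rw [h2]
          by_cases hxj : x = j
          · subst hxj; simp [hg, hz, hjL, List.mem_append]
          · simp [List.mem_append, hxj]
      · rw [List.foldl_cons,
          show rowStepA r (t, g) j = (t + pyCell r j, g) from by simp [rowStepA, hg, hz]]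
        obtain ⟨h1, h2⟩ := ih' (t + pyCell r j) g
        refine ⟨?_, fun x => ?_⟩
        · rw [h1, List.map_cons, List.sum_cons, if_neg hg, if_neg hz]
          ring
        · rw [h2]
          by_cases hxj : x = j
          · subst hxj; simp [hg, hz, hjL]
          · simp [hxj]

-- characterisation of A's outer fold over the rows
theorem outerFoldA_spec (cols : Nat) (rows : List (List Int)) :
    ∀ (t : Int) (g : List Nat),
      (rows.foldl (fun st r => (List.range cols).foldl (rowStepA r) st) (t, g)).1
        = t + ((List.range cols).map
                (fun j => if j ∈ g then 0 else colSumB rows j)).sum := by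
  induction rows with
  | nil => intro t g; simp [colSumB]
  | cons r rest ih =>
    intro t g
    rw [List.foldl_cons]
    obtain ⟨h1, h2⟩ := rowFoldA_spec r (List.range cols) List.nodup_range t g
    rw [ih _ _, h1, add_assoc]
    congr 1
    rw [← sum_map_add_int]
    apply congrArg List.sum
    apply List.map_congr_left
    intro j hj
    have hmem := h2 j
    by_cases hg : j ∈ g
    · have hin : j ∈ ((List.range cols).foldl (rowStepA r) (t, g)).2 :=
        hmem.mpr (Or.inl hg)
      simp [hg, hin]
    · by_cases hz : pyCell r j = 0
      · have hin : j ∈ ((List.range cols).foldl (rowStepA r) (t, g)).2 :=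
          hmem.mpr (Or.inr ⟨hj, hg, hz⟩)
        simp [hg, hz, hin, colSumB]
      · have hout : j ∉ ((List.range cols).foldl (rowStepA r) (t, g)).2 := by
          intro h
          rcases hmem.mp h with h' | ⟨_, _, hz'⟩
          · exact hg h'
          · exact hz hz'
        simp [hg, hz, hout, colSumB]

-- foldl with accumulation equals sum of a map
theorem foldl_add_sum {α : Type} (l : List α) (f : α → Int) :
    ∀ (t : Int), l.foldl (fun acc x => acc + f x) t = t + (l.map f).sum := by
  induction l with
  | nil => intro t; simp
  | cons a l ih => intro t; simp [ih]; ring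

-- ===== VERDICT (by name: the statement is the Claim_ definition above) =====
theorem solution_spec : Claim_equal_solution := by
  intro matrix _ _
  unfold Spec_solution solution_alt solution
  rw [foldl_range_getD matrix []
    (fun st r => (List.range (matrix.headD []).length).foldl (rowStepA r) st) (0, []),
    outerFoldA_spec, foldl_add_sum]
  simp
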